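-- pv_equiv track=rewrite | github.com/Intelligent-CAT-Lab/SEER | mutant_generation/mutant_stats.py | get_method_name
-- ===== SOURCE A (Python) =====
-- def get_method_name(code):
--     position = code.index("(") -1
--     method_name = []
--     while position >= 0:
--         if code[position] != " " and code[position] != "\t":
--             method_name.insert(0,code[position])
--             position -=1
--         else:
--             break
--     result = ""
--     for elem in method_name:
--         result+=elem
--     return result
-- ===== SOURCE B (Python) =====
-- def get_method_name(code):
--     prefix = code[:code.index("(")]
--     idx = max(prefix.rfind(" "), prefix.rfind("\t"))
--     return prefix[idx+1:]
-- ===== Notes on version B (the rewrite author's own statement) =====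
-- stated objective: simpler
-- what changed: Replaces the character-by-character backward while-loop with list building and string re-concatenation by slicing the prefix before '(' after the last space/tab found with rfind.
import Mathlib
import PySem

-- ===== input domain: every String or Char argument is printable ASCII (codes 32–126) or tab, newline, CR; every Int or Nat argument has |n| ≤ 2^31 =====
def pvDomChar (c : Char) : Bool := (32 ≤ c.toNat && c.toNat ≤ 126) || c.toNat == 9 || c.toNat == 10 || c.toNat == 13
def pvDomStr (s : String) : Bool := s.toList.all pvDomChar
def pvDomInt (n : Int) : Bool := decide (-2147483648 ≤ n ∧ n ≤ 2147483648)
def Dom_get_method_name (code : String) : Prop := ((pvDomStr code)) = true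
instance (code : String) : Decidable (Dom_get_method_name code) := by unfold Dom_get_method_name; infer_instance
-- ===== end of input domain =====

-- B replaces A's backward character walk (building a list by insert(0,…) then re-concatenating it
-- char by char) with two rfind calls and one slice of the prefix before '(' — simpler, same result.

-- ===== PORT A =====
-- the while-loop of A: walk left from `position`, prepending non-space/non-tab chars
def pvWalkA (cs : List Char) (position : Int) (method_name : List Char) : List Char :=
  if h : position ≥ 0 then
    -- `position` is always in range in A's loop, so pyGetD is exact here
    if PySem.List.pyGetD cs position ' ' ≠ ' ' ∧ PySem.List.pyGetD cs position ' ' ≠ '\t' then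
      pvWalkA cs (position - 1) (PySem.List.pyGetD cs position ' ' :: method_name)
    else method_name
  else method_name
termination_by (position + 1).toNat
decreasing_by omega

def get_method_name (code : String) : String :=
  match PySem.List.index? code.toList '(' with
  | none => ""   -- Python raises ValueError here; excluded by Pre_
  | some i =>
    String.ofList ((pvWalkA code.toList ((i : Int) - 1) []).foldl
      (fun result elem => result ++ [elem]) [])

-- ===== PORT B =====
-- exact port of str.rfind for a single-character needle: last index of c in p, -1 if absent
def pvRfind (p : List Char) (c : Char) : Int :=
  match PySem.List.index? p.reverse c with
  | some k => (p.length : Int) - 1 - (k : Int)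
  | none => -1

def get_method_name_alt (code : String) : String :=
  match PySem.List.index? code.toList '(' with
  | none => ""   -- Python raises ValueError here; excluded by Pre_
  | some i =>
    let pre := PySem.List.slice code.toList none (some (i : Int))
    String.ofList (PySem.List.slice pre
      (some (max (pvRfind pre ' ') (pvRfind pre '\t') + 1)) none)

-- ===== PRECONDITION & SPEC =====
-- Pre_ excludes exactly the inputs with no "(": Python's code.index("(") raises ValueError there.
def Pre_get_method_name (code : String) : Prop := '(' ∈ code.toList
instance (code : String) : Decidable (Pre_get_method_name code) := by unfold Pre_get_method_name; infer_instance
def pvWitness_get_method_name : String := "def f(x):"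

def Spec_get_method_name (code : String) (out : String) : Prop := out = get_method_name_alt code
instance (code : String) (out : String) : Decidable (Spec_get_method_name code out) := by unfold Spec_get_method_name; infer_instance

-- ===== CLAIM (what is proved, stated in full; the proofs are below) =====
def Claim_equal_get_method_name : Prop := ∀ (code : String), Dom_get_method_name code → Pre_get_method_name code → Spec_get_method_name code (get_method_name code)

-- ===== LEMMAS AND PROOFS =====

-- the common value: the trailing run of non-space/non-tab characters of p
def pvRun (p : List Char) : List Char :=
  (p.reverse.takeWhile (fun c => decide (c ≠ ' ' ∧ c ≠ '\t'))).reverse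

theorem pvRun_append (p : List Char) (c : Char) :
    pvRun (p ++ [c]) = if c ≠ ' ' ∧ c ≠ '\t' then pvRun p ++ [c] else [] := by
  unfold pvRun
  rw [List.reverse_append]
  simp only [List.reverse_singleton, List.singleton_append, List.takeWhile_cons]
  by_cases h : c ≠ ' ' ∧ c ≠ '\t'
  · rw [if_pos h, if_pos (by simp [h.1, h.2]), List.reverse_cons]
  · rw [if_neg h, if_neg (by simpa using h), List.reverse_nil]

theorem pvWalkA_eq (cs : List Char) (n : Nat) (hn : n ≤ cs.length) (acc : List Char) :
    pvWalkA cs ((n : Int) - 1) acc = pvRun (cs.take n) ++ acc := by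
  induction n generalizing acc with
  | zero => rw [pvWalkA]; simp [pvRun]
  | succ m ih =>
    have hm : m < cs.length := by omega
    have htake : cs.take (m + 1) = cs.take m ++ [cs[m]] := by
      rw [List.take_add_one]; simp [List.getElem?_eq_getElem hm]
    rw [pvWalkA]
    have hpos : ((m + 1 : Nat) : Int) - 1 ≥ 0 := by omega
    rw [dif_pos hpos]
    have hget : PySem.List.pyGetD cs (((m + 1 : Nat) : Int) - 1) ' ' = cs[m] := by
      have h1 : ((m + 1 : Nat) : Int) - 1 = (m : Nat) := by omega
      rw [h1, PySem.List.pyGetD_natCast]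
      simp [List.getD, List.getElem?_eq_getElem hm]
    rw [hget, htake, pvRun_append]
    split_ifs with h
    · have h2 : ((m + 1 : Nat) : Int) - 1 - 1 = (m : Int) - 1 := by omega
      rw [h2, ih (by omega)]; simp
    · rfl

theorem pvRfind_append (p : List Char) (c x : Char) :
    pvRfind (p ++ [c]) x = if c = x then (p.length : Int) else pvRfind p x := by
  unfold pvRfind
  rw [List.reverse_append]
  simp only [List.reverse_singleton, List.singleton_append, List.length_append,
    List.length_singleton]
  by_cases h : c = x
  · subst h
    rw [PySem.List.index?_cons_self, if_pos rfl]
    push_cast; ring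
  · rw [PySem.List.index?_cons_of_ne _ h, if_neg h]
    cases hk : PySem.List.index? p.reverse x with
    | none => rfl
    | some k => simp only [Option.map_some]; push_cast; ring

theorem pvRfind_lt (p : List Char) (x : Char) :
    pvRfind p x < (p.length : Int) ∧ -1 ≤ pvRfind p x := by
  unfold pvRfind
  cases hk : PySem.List.index? p.reverse x with
  | none => dsimp only; constructor <;> omega
  | some k =>
    obtain ⟨pre, suf, hps, hlen, -⟩ := (PySem.List.index?_eq_some_iff _ _ _).mp hk
    have hkl : k < p.length := by
      have h := congrArg List.length hps
      simp at h; omega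
    dsimp only; constructor <;> omega

theorem pvSliceB_eq (p : List Char) :
    PySem.List.slice p (some (max (pvRfind p ' ') (pvRfind p '\t') + 1)) none = pvRun p := by
  induction p using List.reverseRecOn with
  | nil => simp [pvRun, PySem.List.slice]
  | append_singleton q c ih =>
    rw [pvRfind_append, pvRfind_append, pvRun_append]
    obtain ⟨hs1, hs2⟩ := pvRfind_lt q ' '
    obtain ⟨ht1, ht2⟩ := pvRfind_lt q '\t'
    by_cases hc : c ≠ ' ' ∧ c ≠ '\t'
    · rw [if_neg hc.1, if_neg hc.2, if_pos hc]
      set idx := max (pvRfind q ' ') (pvRfind q '\t') with hidx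
      rw [PySem.List.slice_some_none] at ih ⊢
      have hcl : ∀ (n : Nat), 0 ≤ idx + 1 → idx + 1 ≤ (n : Int) →
          PySem.List.clampIdx n (idx + 1) = (idx + 1).toNat := by
        intro n h0 hn
        unfold PySem.List.clampIdx
        split_ifs <;> omega
      rw [hcl _ (by omega) (by simp; omega)]
      rw [hcl _ (by omega) (by omega)] at ih
      rw [List.drop_append_of_le_length (by omega), ih]
    · rw [if_neg hc]
      rcases Classical.em (c = ' ') with h | h
      · subst h
        rw [if_pos rfl, if_neg (by decide)]
        have hmax : max (q.length : Int) (pvRfind q '\t') = (q.length : Int) := by omega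
        rw [hmax, PySem.List.slice_some_none]
        have hcl : PySem.List.clampIdx (q ++ [' ']).length ((q.length : Int) + 1) = q.length + 1 := by
          unfold PySem.List.clampIdx
          simp only [List.length_append, List.length_singleton]
          split_ifs <;> omega
        rw [hcl]
        have hlen : q.length + 1 = (q ++ [' ']).length := by simp
        rw [hlen, List.drop_length]
      · have h' : c = '\t' := by tauto
        subst h'
        rw [if_neg (by decide), if_pos rfl]
        have hmax : max (pvRfind q ' ') (q.length : Int) = (q.length : Int) := by omega
        rw [hmax, PySem.List.slice_some_none]
        have hcl : PySem.List.clampIdx (q ++ ['\t']).length ((q.length : Int) + 1) = q.length + 1 := by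
          unfold PySem.List.clampIdx
          simp only [List.length_append, List.length_singleton]
          split_ifs <;> omega
        rw [hcl]
        have hlen : q.length + 1 = (q ++ ['\t']).length := by simp
        rw [hlen, List.drop_length]

-- ===== VERDICT (by name: the statement is the Claim_ definition above) =====
theorem get_method_name_spec : Claim_equal_get_method_name := by
  intro code _ hpre
  unfold Spec_get_method_name get_method_name get_method_name_alt
  have hsome : (PySem.List.index? code.toList '(').isSome := by
    rw [PySem.List.index?_isSome_iff]; exact hpre
  obtain ⟨i, hi⟩ := Option.isSome_iff_exists.mp hsome
  rw [hi]
  dsimp only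
  obtain ⟨pre, suf, hps, hlen, -⟩ := (PySem.List.index?_eq_some_iff _ _ _).mp hi
  have hile : i ≤ code.toList.length := by
    rw [hps, ← hlen]; simp
  rw [PySem.List.slice_to _ (by omega)]
  have hti : ((i : Int)).toNat = i := by omega
  rw [hti, pvWalkA_eq code.toList i hile, PySem.List.foldl_append_singleton, pvSliceB_eq]
  simp
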